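-- pv_equiv track=rewrite | github.com/mathbeveridge/asm | invSSTone1perdiagonal.py | filter_ssts
-- ===== SOURCE A (Python) =====
-- def filter_ssts(potential_ssts):
--     made_it = []
--     for entry in potential_ssts:
--         passed = 0
--         for j in range(len(entry)-1):
--             current_layer = list(entry[j])
--             next_layer = list(entry[j+1])
--             ones = [i for i, x in enumerate(current_layer) if x == 1]
--             num_passed = 0
--             for i in ones:
--                 if sum(next_layer[i:len(next_layer)]) >= sum(current_layer[i:len(current_layer)]):
--                     num_passed += 1
--             if num_passed == sum(current_layer):
--                 passed += 1
--         if passed == len(entry) - 1: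
--             made_it += [entry]
--     return made_it
-- ===== SOURCE B (Python) =====
-- def filter_ssts(potential_ssts):
--     # each layer's suffix sums are computed once, then each index is a table lookup
--     def suffix_sums(xs):
--         out = [0] * (len(xs) + 1)
--         for i in range(len(xs) - 1, -1, -1):
--             out[i] = xs[i] + out[i + 1]
--         return out
--
--     def layer_ok(cur, nxt):
--         sc = suffix_sums(cur)
--         sn = suffix_sums(nxt)
--         num_passed = sum(1 for i, x in enumerate(cur)
--                          if x == 1 and sn[min(i, len(nxt))] >= sc[i])
--         return num_passed == sc[0]
--
--     return [entry for entry in potential_ssts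
--             if sum(layer_ok(entry[j], entry[j + 1])
--                    for j in range(len(entry) - 1)) == len(entry) - 1]
-- ===== Notes on version B (the rewrite author's own statement) =====
-- stated objective: alternative
-- what changed: B precomputes each layer's suffix sums in one right-to-left pass and decides each 1-entry index by two table lookups, replacing A's per-index slice re-summations; the outer filter is a comprehension counting passing layer pairs.
import Mathlib
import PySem

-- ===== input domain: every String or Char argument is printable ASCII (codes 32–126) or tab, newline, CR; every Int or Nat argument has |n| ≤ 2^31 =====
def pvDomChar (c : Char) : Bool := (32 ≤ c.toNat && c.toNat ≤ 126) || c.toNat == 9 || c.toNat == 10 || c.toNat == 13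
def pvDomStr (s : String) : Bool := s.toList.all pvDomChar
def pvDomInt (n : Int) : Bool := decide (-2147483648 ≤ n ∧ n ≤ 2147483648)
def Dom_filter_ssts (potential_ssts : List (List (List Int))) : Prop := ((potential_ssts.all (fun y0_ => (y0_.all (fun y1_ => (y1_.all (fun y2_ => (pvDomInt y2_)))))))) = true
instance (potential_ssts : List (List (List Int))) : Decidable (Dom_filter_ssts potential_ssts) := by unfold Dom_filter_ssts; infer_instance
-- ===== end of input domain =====

-- B checks each layer pair via suffix-sum tables built in one right-to-left pass, instead of A's per-index slice sums; return value proved identical.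

-- ===== PORT A =====
def filter_ssts (potential_ssts : List (List (List Int))) : List (List (List Int)) :=
  potential_ssts.foldl (fun made_it entry =>
    let passed : Int :=
      (PySem.List.pyRange 0 ((entry.length : Int) - 1) 1).foldl (fun passed j =>
        let current_layer := PySem.List.pyGetD entry j []
        let next_layer := PySem.List.pyGetD entry (j + 1) []
        let ones := ((PySem.List.enumerate current_layer 0).filter (fun p => p.2 == 1)).map (fun p => p.1)
        let num_passed : Int := ones.foldl (fun np i =>
          if (PySem.List.slice next_layer (some i) (some (next_layer.length : Int))).sum ≥
             (PySem.List.slice current_layer (some i) (some (current_layer.length : Int))).sum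
          then np + 1 else np) 0
        if num_passed == current_layer.sum then passed + 1 else passed) 0
    if passed == (entry.length : Int) - 1 then made_it ++ [entry] else made_it) []

-- ===== PORT B =====
-- out[i] = xs[i] + out[i+1], built right-to-left as in Source B's suffix_sums loop
def pvSuffixSums : List Int → List Int
  | [] => [0]
  | x :: xs => (x + (pvSuffixSums xs).headD 0) :: pvSuffixSums xs

def pvLayerOk (cur nxt : List Int) : Bool :=
  let sc := pvSuffixSums cur
  let sn := pvSuffixSums nxt
  let num_passed : Int := (PySem.List.enumerate cur 0).foldl (fun np p =>
    if p.2 == 1 && decide (PySem.List.pyGetD sn (min p.1 (nxt.length : Int)) 0 ≥ PySem.List.pyGetD sc p.1 0)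
    then np + 1 else np) 0
  num_passed == PySem.List.pyGetD sc 0 0

def filter_ssts_alt (potential_ssts : List (List (List Int))) : List (List (List Int)) :=
  potential_ssts.filter (fun entry =>
    ((PySem.List.pyRange 0 ((entry.length : Int) - 1) 1).foldl (fun s j =>
        s + (if pvLayerOk (PySem.List.pyGetD entry j []) (PySem.List.pyGetD entry (j + 1) []) then (1 : Int) else 0)) 0)
      == (entry.length : Int) - 1)

-- ===== PRECONDITION & SPEC =====
def Spec_filter_ssts (potential_ssts : List (List (List Int))) (out : List (List (List Int))) : Prop := out = filter_ssts_alt potential_ssts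
instance (potential_ssts : List (List (List Int))) (out : List (List (List Int))) : Decidable (Spec_filter_ssts potential_ssts out) := by unfold Spec_filter_ssts; infer_instance

-- ===== CLAIM (what is proved, stated in full; the proofs are below) =====
def Claim_equal_filter_ssts : Prop := ∀ (potential_ssts : List (List (List Int))), Dom_filter_ssts potential_ssts → Spec_filter_ssts potential_ssts (filter_ssts potential_ssts)

-- ===== LEMMAS AND PROOFS =====

theorem pvSuffixSums_head (xs : List Int) : (pvSuffixSums xs).headD 0 = xs.sum := by
  induction xs with
  | nil => simp [pvSuffixSums]
  | cons x xs ih => simp only [pvSuffixSums, List.headD_cons, List.sum_cons, ih]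

theorem pvSuffixSums_getD (xs : List Int) (k : Nat) :
    (pvSuffixSums xs).getD k 0 = (xs.drop k).sum := by
  induction xs generalizing k with
  | nil => cases k <;> simp [pvSuffixSums]
  | cons x xs ih =>
    cases k with
    | zero => simp only [pvSuffixSums, List.getD_cons_zero, List.drop_zero, List.sum_cons,
        pvSuffixSums_head]
    | succ n => simpa [pvSuffixSums] using ih n

theorem pv_slice_to_len (xs : List Int) (k : Nat) :
    PySem.List.slice xs (some (k : Int)) (some (xs.length : Int)) = xs.drop k := by
  rw [PySem.List.slice_natCast]
  exact List.take_of_length_le (by simp)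

theorem pv_drop_min (xs : List Int) (k : Nat) :
    xs.drop (min k xs.length) = xs.drop k := by
  rcases le_total k xs.length with h | h
  · rw [min_eq_left h]
  · rw [min_eq_right h, List.drop_eq_nil_of_le h, List.drop_eq_nil_of_le (le_refl _)]

theorem pv_if_add (c : Bool) (s : Int) : (if c then s + 1 else s) = s + (if c then (1 : Int) else 0) := by
  cases c <;> simp

-- the inner layer condition of A equals pvLayerOk, for arbitrary layers
theorem pv_inner_eq (cur nxt : List Int) :
    (((((PySem.List.enumerate cur 0).filter (fun p => p.2 == 1)).map (fun p => p.1)).foldl (fun np i =>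
        if (PySem.List.slice nxt (some i) (some (nxt.length : Int))).sum ≥
           (PySem.List.slice cur (some i) (some (cur.length : Int))).sum
        then np + 1 else np) (0 : Int)) == cur.sum)
    = pvLayerOk cur nxt := by
  have hA : (((((PySem.List.enumerate cur 0).filter (fun p => p.2 == 1)).map (fun p => p.1)).foldl (fun np i =>
        if (PySem.List.slice nxt (some i) (some (nxt.length : Int))).sum ≥
           (PySem.List.slice cur (some i) (some (cur.length : Int))).sum
        then np + 1 else np) (0 : Int)))
      = ((PySem.List.enumerate cur 0).foldl (fun np p =>
          if p.2 == 1 && decide (PySem.List.pyGetD (pvSuffixSums nxt) (min p.1 (nxt.length : Int)) 0 ≥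
              PySem.List.pyGetD (pvSuffixSums cur) p.1 0)
          then np + 1 else np) (0 : Int)) := by
    have h1 := PySem.List.foldl_count_if (fun i => decide ((PySem.List.slice nxt (some i) (some (nxt.length : Int))).sum ≥
           (PySem.List.slice cur (some i) (some (cur.length : Int))).sum))
           ((((PySem.List.enumerate cur 0).filter (fun p => p.2 == 1)).map (fun p => p.1))) 0
    have h2 := PySem.List.foldl_count_if (fun p : Int × Int => p.2 == 1 && decide (PySem.List.pyGetD (pvSuffixSums nxt) (min p.1 (nxt.length : Int)) 0 ≥
              PySem.List.pyGetD (pvSuffixSums cur) p.1 0)) (PySem.List.enumerate cur 0) 0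
    simp only [decide_eq_true_eq] at h1
    rw [h1, h2]
    simp only [zero_add, Int.natCast_inj]
    rw [List.countP_map, List.countP_filter]
    apply List.countP_congr
    intro p hp
    obtain ⟨k, hk, rfl⟩ := (PySem.List.mem_enumerate_iff cur 0 p).mp hp
    have hcond : (decide ((PySem.List.slice nxt (some ((k : Nat) : Int)) (some (nxt.length : Int))).sum ≥
           (PySem.List.slice cur (some ((k : Nat) : Int)) (some (cur.length : Int))).sum))
        = (decide (PySem.List.pyGetD (pvSuffixSums nxt) (min ((k : Nat) : Int) (nxt.length : Int)) 0 ≥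
              PySem.List.pyGetD (pvSuffixSums cur) ((k : Nat) : Int) 0)) := by
      have hmin : min ((k : Nat) : Int) ((nxt.length : Nat) : Int) = ((min k nxt.length : Nat) : Int) :=
        (Nat.cast_min k nxt.length).symm
      rw [hmin, pv_slice_to_len, pv_slice_to_len, PySem.List.pyGetD_natCast,
        PySem.List.pyGetD_natCast, pvSuffixSums_getD, pvSuffixSums_getD, pv_drop_min]
    simp only [Function.comp, zero_add]
    rw [hcond, Bool.and_comm]
  rw [pvLayerOk]
  simp only [hA]
  have hsc : PySem.List.pyGetD (pvSuffixSums cur) 0 0 = cur.sum := by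
    have h0 := PySem.List.pyGetD_natCast (pvSuffixSums cur) 0 0
    simp only [Nat.cast_zero] at h0
    rw [h0]
    simpa using pvSuffixSums_getD cur 0
  rw [hsc]

theorem pv_entry_cond (entry : List (List Int)) :
    (((PySem.List.pyRange 0 ((entry.length : Int) - 1) 1).foldl (fun passed j =>
        let current_layer := PySem.List.pyGetD entry j []
        let next_layer := PySem.List.pyGetD entry (j + 1) []
        let ones := ((PySem.List.enumerate current_layer 0).filter (fun p => p.2 == 1)).map (fun p => p.1)
        let num_passed : Int := ones.foldl (fun np i =>
          if (PySem.List.slice next_layer (some i) (some (next_layer.length : Int))).sum ≥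
             (PySem.List.slice current_layer (some i) (some (current_layer.length : Int))).sum
          then np + 1 else np) 0
        if num_passed == current_layer.sum then passed + 1 else passed) (0 : Int)))
    = ((PySem.List.pyRange 0 ((entry.length : Int) - 1) 1).foldl (fun s j =>
        s + (if pvLayerOk (PySem.List.pyGetD entry j []) (PySem.List.pyGetD entry (j + 1) [])
             then (1 : Int) else 0)) 0) := by
  congr 1
  funext passed j
  simp only [pv_if_add]
  rw [pv_inner_eq]

-- ===== VERDICT (by name: the statement is the Claim_ definition above) =====
theorem filter_ssts_spec : Claim_equal_filter_ssts := by
  intro ps _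
  unfold Spec_filter_ssts filter_ssts filter_ssts_alt
  rw [PySem.List.foldl_append_if_eq_filter]
  simp only [List.nil_append]
  apply List.filter_congr
  intro entry _
  rw [pv_entry_cond]
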